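-- pv_equiv track=rewrite | github.com/fedefreak92/dungeon-master-ai-project | states/mercato.py | _elabora_comando_mercato
-- ===== SOURCE A (Python) =====
-- def _elabora_comando_mercato(cmd):
--     cmd = cmd.lower().strip()
--
--     # Mappatura comandi di testo alle azioni
--     if any(x in cmd for x in ["compra", "pozione", "acquista"]):
--         return "1"
--     elif any(x in cmd for x in ["vendi", "vende", "vendere"]):
--         return "2"
--     elif any(x in cmd for x in ["parla", "mercante", "conversare"]):
--         return "3"
--     elif any(x in cmd for x in ["sfida", "combatti", "duello"]):
--         return "4"
--     elif any(x in cmd for x in ["inventario", "zaino", "gestisci"]):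
--         return "5"
--     elif any(x in cmd for x in ["esplora", "cerca", "oggetti"]):
--         return "6"
--     elif any(x in cmd for x in ["prova", "abilità", "skill"]):
--         return "7"
--     elif any(x in cmd for x in ["mappa", "visualizza"]):
--         return "8"
--     elif any(x in cmd for x in ["muovi", "movimento", "vai"]):
--         return "9"
--     elif any(x in cmd for x in ["interagisci", "ambiente", "interazione"]):
--         return "10"
--     elif any(x in cmd for x in ["viaggia", "zona", "cambio", "mappa"]):
--         return "11"
--     else:
--         return cmd  # ritorna il comando originale se non corrisponde a nessuna azione
-- ===== SOURCE B (Python) =====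
-- # One flat keyword->priority map; the answer is the MINIMUM priority among all
-- # matched keywords (groups' codes ascend, so min matched priority = first
-- # matching branch), instead of an ordered first-match chain.
-- _PRIORITY = {
--     "compra": 1, "pozione": 1, "acquista": 1,
--     "vendi": 2, "vende": 2, "vendere": 2,
--     "parla": 3, "mercante": 3, "conversare": 3,
--     "sfida": 4, "combatti": 4, "duello": 4,
--     "inventario": 5, "zaino": 5, "gestisci": 5,
--     "esplora": 6, "cerca": 6, "oggetti": 6,
--     "prova": 7, "abilità": 7, "skill": 7,
--     "mappa": 8, "visualizza": 8,
--     "muovi": 9, "movimento": 9, "vai": 9,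
--     "interagisci": 10, "ambiente": 10, "interazione": 10,
--     "viaggia": 11, "zona": 11, "cambio": 11,
-- }
--
--
-- def _elabora_comando_mercato(cmd):
--     cmd = cmd.lower().strip()
--     matched = [code for kw, code in _PRIORITY.items() if kw in cmd]
--     return str(min(matched)) if matched else cmd
-- ===== Notes on version B (the rewrite author's own statement) =====
-- stated objective: alternative
-- what changed: Replaces the ordered if-elif first-match chain by a flat keyword-to-priority dict: B collects the priorities of ALL keywords occurring in the command and returns the minimum (codes ascend with branch order, so min matched priority equals A's first matching branch).
import Mathlib
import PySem

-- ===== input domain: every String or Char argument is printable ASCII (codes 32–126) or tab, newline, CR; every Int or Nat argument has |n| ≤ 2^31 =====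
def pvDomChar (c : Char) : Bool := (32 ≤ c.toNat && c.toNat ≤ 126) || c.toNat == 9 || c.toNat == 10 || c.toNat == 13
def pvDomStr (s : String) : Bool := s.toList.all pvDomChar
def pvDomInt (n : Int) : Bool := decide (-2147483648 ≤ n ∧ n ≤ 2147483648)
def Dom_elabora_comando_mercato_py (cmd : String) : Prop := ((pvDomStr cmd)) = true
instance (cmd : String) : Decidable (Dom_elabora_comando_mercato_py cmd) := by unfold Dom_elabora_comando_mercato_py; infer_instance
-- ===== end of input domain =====

-- B replaces A's ordered first-match if-elif chain by a flat keyword→priority map: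
-- it collects the priorities of ALL matching keywords and returns the minimum
-- (codes ascend with branch order, so the minimum equals A's first match); idiomatic, same cost.

-- ===== PORT A =====
-- A: literal if-elif chain, each branch an any-substring test.
def elabora_comando_mercato_py (cmd : String) : String :=
  let cmd := PySem.Str.strip (PySem.Str.lower cmd)
  if ["compra", "pozione", "acquista"].any (fun x => PySem.Str.isIn x cmd) then "1"
  else if ["vendi", "vende", "vendere"].any (fun x => PySem.Str.isIn x cmd) then "2"
  else if ["parla", "mercante", "conversare"].any (fun x => PySem.Str.isIn x cmd) then "3"
  else if ["sfida", "combatti", "duello"].any (fun x => PySem.Str.isIn x cmd) then "4"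
  else if ["inventario", "zaino", "gestisci"].any (fun x => PySem.Str.isIn x cmd) then "5"
  else if ["esplora", "cerca", "oggetti"].any (fun x => PySem.Str.isIn x cmd) then "6"
  else if ["prova", "abilità", "skill"].any (fun x => PySem.Str.isIn x cmd) then "7"
  else if ["mappa", "visualizza"].any (fun x => PySem.Str.isIn x cmd) then "8"
  else if ["muovi", "movimento", "vai"].any (fun x => PySem.Str.isIn x cmd) then "9"
  else if ["interagisci", "ambiente", "interazione"].any (fun x => PySem.Str.isIn x cmd) then "10"
  else if ["viaggia", "zona", "cambio", "mappa"].any (fun x => PySem.Str.isIn x cmd) then "11"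
  else cmd

-- ===== PORT B =====
-- B: flat keyword→priority association list (a Python dict, insertion order).
def pvPriority : List (String × Int) :=
  [ ("compra", 1), ("pozione", 1), ("acquista", 1),
    ("vendi", 2), ("vende", 2), ("vendere", 2),
    ("parla", 3), ("mercante", 3), ("conversare", 3),
    ("sfida", 4), ("combatti", 4), ("duello", 4),
    ("inventario", 5), ("zaino", 5), ("gestisci", 5),
    ("esplora", 6), ("cerca", 6), ("oggetti", 6),
    ("prova", 7), ("abilità", 7), ("skill", 7),
    ("mappa", 8), ("visualizza", 8),
    ("muovi", 9), ("movimento", 9), ("vai", 9),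
    ("interagisci", 10), ("ambiente", 10), ("interazione", 10),
    ("viaggia", 11), ("zona", 11), ("cambio", 11) ]

-- matched = [code for kw, code in _PRIORITY.items() if kw in cmd]; str(min(matched)) if matched else cmd
def elabora_comando_mercato_py_alt (cmd : String) : String :=
  let cmd := PySem.Str.strip (PySem.Str.lower cmd)
  let matched := pvPriority.filterMap (fun p => if PySem.Str.isIn p.1 cmd then some p.2 else none)
  match PySem.List.min? matched (fun x => x) with
  | some m => PySem.Int.toStr m
  | none => cmd

-- ===== PRECONDITION & SPEC =====
def Spec_elabora_comando_mercato_py (cmd : String) (out : String) : Prop := out = elabora_comando_mercato_py_alt cmd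
instance (cmd : String) (out : String) : Decidable (Spec_elabora_comando_mercato_py cmd out) := by unfold Spec_elabora_comando_mercato_py; infer_instance

-- ===== CLAIM (what is proved, stated in full; the proofs are below) =====
def Claim_equal_elabora_comando_mercato_py : Prop := ∀ (cmd : String), Dom_elabora_comando_mercato_py cmd → Spec_elabora_comando_mercato_py cmd (elabora_comando_mercato_py cmd)

-- ===== LEMMAS AND PROOFS =====

-- proof-side view of A: groups of keywords with ascending integer codes
def pvGroups : List (List String × Int) :=
  [ (["compra", "pozione", "acquista"], 1),
    (["vendi", "vende", "vendere"], 2),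
    (["parla", "mercante", "conversare"], 3),
    (["sfida", "combatti", "duello"], 4),
    (["inventario", "zaino", "gestisci"], 5),
    (["esplora", "cerca", "oggetti"], 6),
    (["prova", "abilità", "skill"], 7),
    (["mappa", "visualizza"], 8),
    (["muovi", "movimento", "vai"], 9),
    (["interagisci", "ambiente", "interazione"], 10),
    (["viaggia", "zona", "cambio"], 11) ]

-- first group (in order) one of whose keywords occurs in s
def pvFirst (gs : List (List String × Int)) (s : String) : Option Int :=
  match gs with
  | [] => none
  | (subs, c) :: rest =>
      if subs.any (fun x => PySem.Str.isIn x s) then some c else pvFirst rest s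

def pvFlatOf (gs : List (List String × Int)) : List (String × Int) :=
  gs.flatMap (fun g => g.1.map (fun kw => (kw, g.2)))

theorem pv_min?_eq_some (l : List Int) (c : Int) (hc : c ∈ l) (hle : ∀ x ∈ l, c ≤ x) :
    PySem.List.min? l (fun x => x) = some c := by
  cases h : PySem.List.min? l (fun x => x) with
  | none =>
      rw [PySem.List.min?_eq_none_iff] at h
      subst h; simp at hc
  | some m =>
      have hmem := PySem.List.min?_mem (xs := l) (key := fun x => x) h
      have hmin := PySem.List.min?_isMin (xs := l) (key := fun x => x) h
      have h1 : m ≤ c := hmin c hc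
      have h2 : c ≤ m := hle m hmem
      have : m = c := le_antisymm h1 h2
      simp [this]

theorem pv_minFlat_eq_first (s : String) (gs : List (List String × Int))
    (hps : gs.Pairwise (fun a b => a.2 < b.2)) :
    PySem.List.min?
      ((pvFlatOf gs).filterMap (fun p => if PySem.Str.isIn p.1 s then some p.2 else none))
      (fun x => x) = pvFirst gs s := by
  induction gs with
  | nil =>
      simp [pvFlatOf, pvFirst, PySem.List.min?_eq_none_iff]
  | cons g rest ih =>
      obtain ⟨subs, c⟩ := g
      rw [List.pairwise_cons] at hps
      obtain ⟨hlt, hrest⟩ := hps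
      have hsplit : pvFlatOf ((subs, c) :: rest) =
          subs.map (fun kw => (kw, c)) ++ pvFlatOf rest := by
        simp [pvFlatOf]
      rw [hsplit, List.filterMap_append]
      by_cases hany : subs.any (fun x => PySem.Str.isIn x s) = true
      · -- front nonempty, all = c; back elements all > c
        have hfront_mem : (c : Int) ∈
            (subs.map (fun kw => (kw, c))).filterMap
              (fun p => if PySem.Str.isIn p.1 s then some p.2 else none) := by
          rw [List.any_eq_true] at hany
          obtain ⟨kw, hkw, hin⟩ := hany
          rw [List.mem_filterMap]
          refine ⟨(kw, c), List.mem_map_of_mem hkw, ?_⟩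
          rw [show PySem.Str.isIn ((kw, c) : String × Int).1 s = true from hin]
          rfl
        have hall : ∀ x ∈
            (subs.map (fun kw => (kw, c))).filterMap
              (fun p => if PySem.Str.isIn p.1 s then some p.2 else none) ++
            (pvFlatOf rest).filterMap
              (fun p => if PySem.Str.isIn p.1 s then some p.2 else none), c ≤ x := by
          intro x hx
          rw [List.mem_append] at hx
          rcases hx with hx | hx
          · rw [List.mem_filterMap] at hx
            obtain ⟨p, hp, hf⟩ := hx
            rw [List.mem_map] at hp
            obtain ⟨kw, _, rfl⟩ := hp
            split at hf
            · injection hf with h; omega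
            · cases hf
          · rw [List.mem_filterMap] at hx
            obtain ⟨p, hp, hf⟩ := hx
            simp only [pvFlatOf, List.mem_flatMap, List.mem_map] at hp
            obtain ⟨g, hg, kw, _, rfl⟩ := hp
            split at hf
            · injection hf with h
              have := hlt g hg
              omega
            · cases hf
        rw [pv_min?_eq_some _ c (List.mem_append_left _ hfront_mem) hall]
        simp only [pvFirst]
        rw [if_pos hany]
      · -- no keyword of this group occurs: front is empty
        have hfront : (subs.map (fun kw => (kw, c))).filterMap
            (fun p => if PySem.Str.isIn p.1 s then some p.2 else none) = [] := by
          rw [List.filterMap_eq_nil_iff]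
          intro p hp
          rw [List.mem_map] at hp
          obtain ⟨kw, hkw, rfl⟩ := hp
          have hfalse : PySem.Str.isIn kw s = false := by
            cases h : PySem.Str.isIn kw s
            · rfl
            · exact absurd (List.any_eq_true.mpr ⟨kw, hkw, h⟩) hany
          rw [show PySem.Str.isIn ((kw, c) : String × Int).1 s = false from hfalse]
          rfl
        rw [hfront, List.nil_append, ih hrest]
        simp only [pvFirst]
        rw [if_neg hany]

set_option maxHeartbeats 2000000 in
theorem pv_alt_body (s : String) :
    (match PySem.List.min?
        (pvPriority.filterMap (fun p => if PySem.Str.isIn p.1 s then some p.2 else none))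
        (fun x => x) with
     | some m => PySem.Int.toStr m
     | none => s) =
    (match pvFirst pvGroups s with
     | some m => PySem.Int.toStr m
     | none => s) := by
  rw [show pvPriority = pvFlatOf pvGroups from rfl,
      pv_minFlat_eq_first s pvGroups (by decide)]

set_option maxHeartbeats 2000000 in
theorem pv_chain_eq (s : String) :
    (if ["compra", "pozione", "acquista"].any (fun x => PySem.Str.isIn x s) then "1"
     else if ["vendi", "vende", "vendere"].any (fun x => PySem.Str.isIn x s) then "2"
     else if ["parla", "mercante", "conversare"].any (fun x => PySem.Str.isIn x s) then "3"
     else if ["sfida", "combatti", "duello"].any (fun x => PySem.Str.isIn x s) then "4"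
     else if ["inventario", "zaino", "gestisci"].any (fun x => PySem.Str.isIn x s) then "5"
     else if ["esplora", "cerca", "oggetti"].any (fun x => PySem.Str.isIn x s) then "6"
     else if ["prova", "abilità", "skill"].any (fun x => PySem.Str.isIn x s) then "7"
     else if ["mappa", "visualizza"].any (fun x => PySem.Str.isIn x s) then "8"
     else if ["muovi", "movimento", "vai"].any (fun x => PySem.Str.isIn x s) then "9"
     else if ["interagisci", "ambiente", "interazione"].any (fun x => PySem.Str.isIn x s) then "10"
     else if ["viaggia", "zona", "cambio", "mappa"].any (fun x => PySem.Str.isIn x s) then "11"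
     else s) =
    (match pvFirst pvGroups s with
     | some m => PySem.Int.toStr m
     | none => s) := by
  simp only [pvGroups, pvFirst,
    apply_ite (fun o : Option Int => match o with | some m => PySem.Int.toStr m | none => s),
    show PySem.Int.toStr 1 = "1" from rfl, show PySem.Int.toStr 2 = "2" from rfl,
    show PySem.Int.toStr 3 = "3" from rfl, show PySem.Int.toStr 4 = "4" from rfl,
    show PySem.Int.toStr 5 = "5" from rfl, show PySem.Int.toStr 6 = "6" from rfl,
    show PySem.Int.toStr 7 = "7" from rfl, show PySem.Int.toStr 8 = "8" from rfl,
    show PySem.Int.toStr 9 = "9" from rfl, show PySem.Int.toStr 10 = "10" from rfl,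
    show PySem.Int.toStr 11 = "11" from rfl]
  by_cases hm : PySem.Str.isIn "mappa" s = true
  · simp only [List.any_cons, List.any_nil, Bool.or_false, hm, Bool.or_true, Bool.true_or, if_true]
  · rw [Bool.not_eq_true] at hm
    simp only [List.any_cons, List.any_nil, Bool.or_false, hm, Bool.false_or]



-- ===== VERDICT (by name: the statement is the Claim_ definition above) =====
theorem elabora_comando_mercato_py_spec : Claim_equal_elabora_comando_mercato_py := by
  intro cmd _
  show elabora_comando_mercato_py cmd = elabora_comando_mercato_py_alt cmd
  unfold elabora_comando_mercato_py elabora_comando_mercato_py_alt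
  exact (pv_chain_eq (PySem.Str.strip (PySem.Str.lower cmd))).trans
    (pv_alt_body (PySem.Str.strip (PySem.Str.lower cmd))).symm
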